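-- pv_equiv track=rewrite | github.com/jethack23/leetcode-daily | 2024/01/d02_p2610.py | solution
-- ===== SOURCE A (Python) =====
-- from collections import Counter
--
-- def solution(nums):
--     cnt = Counter(nums)
--     rst = []
--     for [n, c] in cnt.items():
--         while len(rst) < c:
--             rst.append([])
--         for l in rst[:c]:
--             l.append(n)
--     return rst
-- ===== SOURCE B (Python) =====
-- from collections import Counter
--
-- def solution(nums):
--     cnt = Counter(nums)
--     m = max(cnt.values(), default=0)
--     return [[n for n, c in cnt.items() if c > i] for i in range(m)]
-- ===== Notes on version B (the rewrite author's own statement) =====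
-- stated objective: simpler
-- what changed: B builds each output row directly by one comprehension over the Counter's items (row-outer/item-inner), instead of A's item-outer loop that grows a mutable list of rows and appends into a slice of it.
import Mathlib
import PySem

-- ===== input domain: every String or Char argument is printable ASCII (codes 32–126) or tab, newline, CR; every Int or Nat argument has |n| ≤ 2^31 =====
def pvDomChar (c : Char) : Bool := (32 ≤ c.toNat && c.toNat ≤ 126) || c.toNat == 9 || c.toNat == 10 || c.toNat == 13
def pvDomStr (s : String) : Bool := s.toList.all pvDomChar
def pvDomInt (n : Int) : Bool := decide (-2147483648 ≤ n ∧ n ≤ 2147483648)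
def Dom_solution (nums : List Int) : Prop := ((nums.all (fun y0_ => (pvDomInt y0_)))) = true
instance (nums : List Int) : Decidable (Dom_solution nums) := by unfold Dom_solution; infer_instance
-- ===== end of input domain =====

-- B builds each output row directly by one filter over the counter's items, replacing A's
-- grow-and-append mutable row list; objective: simpler.


-- ===== PORT A =====
-- 'while len(rst) < c: rst.append([])'
def padA (rst : List (List Int)) (c : Int) : List (List Int) :=
  if h : (rst.length : Int) < c then padA (rst ++ [[]]) c else rst
termination_by (c - rst.length).toNat
decreasing_by simp; omega

-- 'for l in rst[:c]: l.append(n)' appends n in place to the first c rows (Counter counts are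
-- ≥ 1 and after the while loop len(rst) ≥ c, so rst[:c] is the prefix of length c): map over it.
def stepA (rst : List (List Int)) (p : Int × Int) : List (List Int) :=
  let rst' := padA rst p.2
  (rst'.take p.2.toNat).map (fun l => l ++ [p.1]) ++ rst'.drop p.2.toNat

def solution (nums : List Int) : List (List Int) :=
  let cnt := PySem.Dict.counter nums
  cnt.items.foldl stepA []

-- ===== PORT B =====
def solution_alt (nums : List Int) : List (List Int) :=
  let cnt := PySem.Dict.counter nums
  let m : Int := PySem.List.maxD cnt.values (fun v => v) 0
  (PySem.List.pyRange 0 m 1).map (fun i =>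
    (cnt.items.filter (fun p => decide (i < p.2))).map Prod.fst)

-- ===== PRECONDITION & SPEC =====
def Spec_solution (nums : List Int) (out : List (List Int)) : Prop := out = solution_alt nums
instance (nums : List Int) (out : List (List Int)) : Decidable (Spec_solution nums out) := by unfold Spec_solution; infer_instance

-- ===== CLAIM (what is proved, stated in full; the proofs are below) =====
def Claim_equal_solution : Prop := ∀ (nums : List Int), Dom_solution nums → Spec_solution nums (solution nums)

-- ===== LEMMAS AND PROOFS =====

-- canonical form both ports are reduced to: row i lists the keys whose count exceeds i
def rowFn (L : List (Int × Int)) (i : Nat) : List Int :=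
  (L.filter (fun p => decide ((i : Int) < p.2))).map Prod.fst

def maxcOf (L : List (Int × Int)) : Int := (L.map Prod.snd).foldl max 0

def rowsOf (L : List (Int × Int)) : List (List Int) :=
  (List.range (maxcOf L).toNat).map (rowFn L)

theorem padA_eq (rst : List (List Int)) (c : Int) :
    padA rst c = rst ++ List.replicate (c.toNat - rst.length) ([] : List Int) := by
  rw [padA]
  split
  · rename_i h
    rw [padA_eq (rst ++ [[]]) c]
    have h1 : c.toNat - rst.length = (c.toNat - (rst ++ [[]]).length) + 1 := by
      simp; omega
    rw [h1, List.replicate_succ]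
    simp
  · rename_i h
    have h0 : c.toNat - rst.length = 0 := by omega
    simp [h0]
termination_by (c - rst.length).toNat
decreasing_by simp; omega

theorem stepA_rowsOf (L : List (Int × Int)) (n c : Int) (hx : 1 ≤ c)
    (hL : ∀ p ∈ L, 1 ≤ p.2) :
    stepA (rowsOf L) (n, c) = rowsOf (L ++ [(n, c)]) := by
  have hM0 : (0 : Int) ≤ maxcOf L := (PySem.List.le_foldl_max (L.map Prod.snd) 0).1
  have hble : ∀ p ∈ L, p.2 ≤ maxcOf L := fun p hp =>
    (PySem.List.le_foldl_max (L.map Prod.snd) 0).2 p.2 (List.mem_map_of_mem hp)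
  have hemptyRow : ∀ i : Nat, (maxcOf L).toNat ≤ i → rowFn L i = [] := by
    intro i hi
    have hf : L.filter (fun p => decide ((i : Int) < p.2)) = [] := by
      refine List.filter_eq_nil_iff.2 (fun p hp => ?_)
      have h1 := hble p hp
      simp only [decide_eq_true_eq]
      omega
    simp [rowFn, hf]
  have hM' : maxcOf (L ++ [(n, c)]) = max (maxcOf L) c := by
    simp [maxcOf, List.foldl_append]
  have hsplit : ∀ i : Nat, rowFn (L ++ [(n, c)]) i = rowFn L i ++ rowFn [(n, c)] i := by
    intro i
    simp [rowFn, List.filter_append]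
  have hone : ∀ i : Nat, i < c.toNat → rowFn [(n, c)] i = [n] := by
    intro i hi
    simp [rowFn, show (i : Int) < c from by omega]
  have hnone : ∀ i : Nat, ¬ i < c.toNat → rowFn [(n, c)] i = [] := by
    intro i hi
    simp [rowFn, show ¬ ((i : Int) < c) from by omega]
  have hPget : ∀ (j : Nat)
      (hj : j < ((List.range (maxcOf L).toNat).map (rowFn L)
        ++ List.replicate (c.toNat - (maxcOf L).toNat) ([] : List Int)).length),
      ((List.range (maxcOf L).toNat).map (rowFn L)
        ++ List.replicate (c.toNat - (maxcOf L).toNat) ([] : List Int))[j]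
      = if j < (maxcOf L).toNat then rowFn L j else [] := by
    intro j hj
    by_cases hjM : j < (maxcOf L).toNat
    · rw [List.getElem_append_left (by simpa using hjM)]
      rw [List.getElem_map, List.getElem_range, if_pos hjM]
    · rw [List.getElem_append_right (by simp; omega)]
      rw [List.getElem_replicate, if_neg hjM]
  have hpad : padA (rowsOf L) c
      = (List.range (maxcOf L).toNat).map (rowFn L)
        ++ List.replicate (c.toNat - (maxcOf L).toNat) ([] : List Int) := by
    simp [padA_eq, rowsOf]
  have hstep : stepA (rowsOf L) (n, c)
      = (((List.range (maxcOf L).toNat).map (rowFn L)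
          ++ List.replicate (c.toNat - (maxcOf L).toNat) ([] : List Int)).take c.toNat).map
            (fun l => l ++ [n])
        ++ ((List.range (maxcOf L).toNat).map (rowFn L)
          ++ List.replicate (c.toNat - (maxcOf L).toNat) ([] : List Int)).drop c.toNat := by
    simp only [stepA]
    rw [hpad]
  rw [hstep]
  simp only [rowsOf]
  rw [hM']
  apply List.ext_getElem
  · simp only [List.length_append, List.length_map, List.length_take, List.length_drop,
      List.length_range, List.length_replicate]
    omega
  · intro i h1 h2
    have hi2 : i < max (maxcOf L).toNat c.toNat := by
      simp only [List.length_map, List.length_range] at h2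
      omega
    rw [List.getElem_map, List.getElem_range, hsplit i]
    by_cases hic : i < c.toNat
    · rw [hone i hic]
      rw [List.getElem_append_left (by
        simp only [List.length_map, List.length_take, List.length_append, List.length_range,
          List.length_replicate]
        omega)]
      rw [List.getElem_map, List.getElem_take]
      rw [hPget i (by
        simp only [List.length_append, List.length_map, List.length_range, List.length_replicate]
        omega)]
      by_cases him : i < (maxcOf L).toNat
      · rw [if_pos him]
      · rw [if_neg him, hemptyRow i (by omega)]
    · rw [hnone i hic, List.append_nil]
      have him : i < (maxcOf L).toNat := by omega
      rw [List.getElem_append_right (by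
        simp only [List.length_map, List.length_take, List.length_append, List.length_range,
          List.length_replicate]
        omega)]
      rw [List.getElem_drop]
      simp only [List.length_map, List.length_take, List.length_append, List.length_range,
        List.length_replicate]
      have e : c.toNat + (i - min c.toNat ((maxcOf L).toNat + (c.toNat - (maxcOf L).toNat))) = i := by
        omega
      simp only [e]
      rw [hPget i (by
        simp only [List.length_append, List.length_map, List.length_range, List.length_replicate]
        omega), if_pos him]

theorem counter_items_pos (nums : List Int) :
    ∀ p ∈ (PySem.Dict.counter nums).items, 1 ≤ p.2 := by
  intro p hp
  rw [PySem.Dict.items_counter] at hp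
  obtain ⟨k, hk, rfl⟩ := List.mem_map.1 hp
  have h1 : 0 < nums.count k := List.count_pos_iff.2 ((PySem.Set.mem_ofList _ _).1 hk)
  simpa using h1

theorem foldA_eq (L : List (Int × Int)) (h : ∀ p ∈ L, 1 ≤ p.2) :
    L.foldl stepA [] = rowsOf L := by
  induction L using List.reverseRecOn with
  | nil => simp [rowsOf, maxcOf]
  | append_singleton L x ih =>
    have hx : 1 ≤ x.2 := h x (by simp)
    have hL : ∀ p ∈ L, 1 ≤ p.2 := fun p hp => h p (by simp [hp])
    rw [List.foldl_append, ih hL]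
    simpa using stepA_rowsOf L x.1 x.2 hx hL

theorem alt_eq (nums : List Int) :
    solution_alt nums = rowsOf (PySem.Dict.counter nums).items := by
  have hpos := counter_items_pos nums
  simp only [solution_alt]
  unfold rowsOf
  have hvals : (PySem.Dict.counter nums).values
      = (PySem.Dict.counter nums).items.map Prod.snd := rfl
  rw [hvals]
  cases hL : (PySem.Dict.counter nums).items with
  | nil => simp [PySem.List.maxD, PySem.List.max?, maxcOf]
  | cons q t =>
    have hq : 1 ≤ q.2 := hpos q (by rw [hL]; exact List.mem_cons_self)
    have h02 : max (0 : Int) q.2 = q.2 := max_eq_right (by omega)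
    have hmaxD : PySem.List.maxD ((q :: t).map Prod.snd) (fun v => v) 0
        = maxcOf (q :: t) := by
      simp [PySem.List.maxD, PySem.List.max?_id_cons, maxcOf, h02]
    rw [hmaxD, PySem.List.pyRange_one]
    simp [rowFn, List.map_map, Function.comp_def]

-- ===== VERDICT (by name: the statement is the Claim_ definition above) =====
theorem solution_spec : Claim_equal_solution := by
  intro nums _
  show solution nums = solution_alt nums
  rw [alt_eq]
  simp only [solution]
  exact foldA_eq _ (counter_items_pos nums)
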